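-- pv_equiv track=rewrite | github.com/agungdharmawangsa/Data-Mining-Thesis-Project | prepocessing.py | str_column_to_int
-- ===== SOURCE A (Python) =====
-- def str_column_to_int(dataset, column):
-- 	class_values = [row[column] for row in dataset]
-- 	unique = list(dict.fromkeys(class_values)) # <== MENGHAPUS DUPLIKASI KELAS NAMUN URUTAN SESUAI CSV
-- 	# unique = set(class_values) <== MENGHAPUS DUPLIKASI KELAS NAMUN RANDOM URUTANNYA
-- 	lookup = dict()
-- 	for i, value in enumerate(unique):
-- 		lookup[value] = i
-- 	for row in dataset:
-- 		row[column] = lookup[row[column]]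
-- 	return lookup
-- ===== SOURCE B (Python) =====
-- def str_column_to_int(dataset, column):
-- 	lookup = {}
-- 	for row in dataset:
-- 		row[column] = lookup.setdefault(row[column], len(lookup))
-- 	return lookup
-- ===== Notes on version B (the rewrite author's own statement) =====
-- stated objective: simpler
-- what changed: A's four phases (collect the column, dict.fromkeys dedup, enumerate into a lookup dict, second rewrite loop) are fused into one setdefault loop that assigns len(lookup) as the next code while rewriting each row.
import Mathlib
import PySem

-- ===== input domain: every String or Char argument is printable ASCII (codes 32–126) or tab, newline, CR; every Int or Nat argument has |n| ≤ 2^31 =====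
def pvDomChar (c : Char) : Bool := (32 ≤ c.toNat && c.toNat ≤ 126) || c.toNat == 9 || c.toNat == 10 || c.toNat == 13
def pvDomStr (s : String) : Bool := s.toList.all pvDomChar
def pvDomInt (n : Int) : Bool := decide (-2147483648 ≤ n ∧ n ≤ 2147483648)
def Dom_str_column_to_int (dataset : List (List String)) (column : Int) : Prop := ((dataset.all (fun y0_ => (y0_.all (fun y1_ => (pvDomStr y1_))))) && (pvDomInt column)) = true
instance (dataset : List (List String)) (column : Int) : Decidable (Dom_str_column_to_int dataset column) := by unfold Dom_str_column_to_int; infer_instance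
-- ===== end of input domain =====

-- B fuses A's four phases (collect column, dedup, enumerate into dict, rewrite column) into one
-- setdefault loop; objective: simpler. Both A and B mutate dataset rows in place identically
-- (row[column] ← its code); the equivalence proved here is about the RETURN value (the lookup dict).

-- ===== PORT A =====
def str_column_to_int (dataset : List (List String)) (column : Int) : List (String × Int) :=
  let classValues := dataset.map (fun row => PySem.List.pyGetD row column "")
  let unique := PySem.List.dedup classValues
  let lookup := (PySem.List.enumerate unique).foldl
    (fun d p => PySem.Dict.insert d p.2 p.1) (PySem.Dict.empty : PySem.Dict String Int)
  -- A's final loop writes row[column] := lookup[row[column]] into the rows (in-place mutation);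
  -- it does not change the returned lookup, so it contributes nothing to the return value.
  lookup.items

-- ===== PORT B =====
def str_column_to_int_alt (dataset : List (List String)) (column : Int) : List (String × Int) :=
  (dataset.foldl
    (fun d row => PySem.Dict.setdefault d (PySem.List.pyGetD row column "") ((PySem.Dict.size d : Int)))
    (PySem.Dict.empty : PySem.Dict String Int)).items

-- ===== PRECONDITION & SPEC =====
-- Pre_: Python raises IndexError when `column` is out of range for some row (e.g. any row with the
-- empty dataset's width, or column ≥ row length); exactly those inputs are excluded.
def Pre_str_column_to_int (dataset : List (List String)) (column : Int) : Prop :=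
  ∀ row ∈ dataset, PySem.Raise.InRange row.length column
instance (dataset : List (List String)) (column : Int) : Decidable (Pre_str_column_to_int dataset column) := by unfold Pre_str_column_to_int; infer_instance

def pvWitness_str_column_to_int : List (List String) × Int := ([["a", "x"], ["b", "x"], ["a", "y"]], 0)

def Spec_str_column_to_int (dataset : List (List String)) (column : Int) (out : List (String × Int)) : Prop := out = str_column_to_int_alt dataset column
instance (dataset : List (List String)) (column : Int) (out : List (String × Int)) : Decidable (Spec_str_column_to_int dataset column out) := by unfold Spec_str_column_to_int; infer_instance

-- ===== CLAIM (what is proved, stated in full; the proofs are below) =====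
def Claim_equal_str_column_to_int : Prop := ∀ (dataset : List (List String)) (column : Int), Dom_str_column_to_int dataset column → Pre_str_column_to_int dataset column → Spec_str_column_to_int dataset column (str_column_to_int dataset column)

-- ===== LEMMAS AND PROOFS =====

-- the dict holding the elements of u, in order, with codes i, i+1, …
def pvPairsFrom (i : Int) : List String → List (String × Int)
  | [] => []
  | x :: u => (x, i) :: pvPairsFrom (i + 1) u

theorem pvPairsFrom_append (u : List String) (v : String) (i : Int) :
    pvPairsFrom i (u ++ [v]) = pvPairsFrom i u ++ [(v, i + u.length)] := by
  induction u generalizing i with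
  | nil => simp [pvPairsFrom]
  | cons x t ih => simp [pvPairsFrom, ih (i + 1)]; ring_nf

theorem pvPairsFrom_eq_enumerate (u : List String) (i : Int) :
    pvPairsFrom i u = (PySem.List.enumerate u i).map (fun p => (p.2, p.1)) := by
  induction u generalizing i with
  | nil => simp [pvPairsFrom, PySem.List.enumerate_nil]
  | cons x t ih => simp [pvPairsFrom, PySem.List.enumerate_cons, ih]

theorem pvPairsFrom_keys (u : List String) (i : Int) :
    (pvPairsFrom i u).map Prod.fst = u := by
  induction u generalizing i with
  | nil => rfl
  | cons x t ih => simp [pvPairsFrom, ih]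

-- B's loop over vs, started from the dict of a nodup list u, ends at the dict of u.foldl Set.add vs
theorem pvB_inv (vs : List String) (u : List String) (hu : u.Nodup) :
    vs.foldl (fun d v => PySem.Dict.setdefault d v ((PySem.Dict.size d : Int)))
      (PySem.Dict.mk (pvPairsFrom 0 u))
    = PySem.Dict.mk (pvPairsFrom 0 (vs.foldl PySem.Set.add u)) := by
  induction vs generalizing u with
  | nil => rfl
  | cons v t ih =>
    have hkeys : (PySem.Dict.mk (pvPairsFrom 0 u)).keys = u := by
      simp [PySem.Dict.keys, pvPairsFrom_keys]
    simp only [List.foldl_cons]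
    by_cases hv : v ∈ u
    · have hc : (PySem.Dict.mk (pvPairsFrom 0 u)).contains v = true := by
        rw [PySem.Dict.contains_iff_mem_keys, hkeys]; exact hv
      rw [PySem.Dict.setdefault_of_contains _ _ hc, PySem.Set.add_of_mem hv]
      exact ih u hu
    · have hc : (PySem.Dict.mk (pvPairsFrom 0 u)).contains v = false := by
        rw [← Bool.not_eq_true, PySem.Dict.contains_iff_mem_keys, hkeys]; exact hv
      rw [PySem.Dict.setdefault_of_not_contains _ _ hc, PySem.Set.add_of_not_mem hv]
      have hsz : ((PySem.Dict.size (PySem.Dict.mk (pvPairsFrom 0 u)) : Int)) = (u.length : Int) := by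
        have := congrArg List.length (pvPairsFrom_keys u 0)
        simpa [PySem.Dict.size] using this
      have hins : PySem.Dict.insert (PySem.Dict.mk (pvPairsFrom 0 u)) v
            ((PySem.Dict.size (PySem.Dict.mk (pvPairsFrom 0 u)) : Int))
          = PySem.Dict.mk (pvPairsFrom 0 (u ++ [v])) := by
        apply PySem.Dict.ext
        rw [PySem.Dict.items_insert_of_not_contains _ _ hc, hsz]
        simp [pvPairsFrom_append]
      rw [hins]
      exact ih (u ++ [v])
        (by simp only [List.nodup_append, List.nodup_singleton, true_and]
            refine ⟨hu, ?_⟩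
            intro a ha b hb hab
            rw [List.mem_singleton] at hb
            subst hb; subst hab; exact hv ha)

theorem str_column_to_int_spec : Claim_equal_str_column_to_int := by
  intro dataset column _ _
  unfold Spec_str_column_to_int str_column_to_int str_column_to_int_alt
  -- B's loop reads each row only through its column value
  rw [(List.foldl_map
        (f := fun row => PySem.List.pyGetD row column "")
        (g := fun (d : PySem.Dict String Int) v =>
          PySem.Dict.setdefault d v ((PySem.Dict.size d : Int)))
        (l := dataset) (init := PySem.Dict.empty)).symm]
  set vs := dataset.map (fun row => PySem.List.pyGetD row column "") with hvs
  -- B side: invariant from the empty dict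
  have hB : vs.foldl (fun d v => PySem.Dict.setdefault d v ((PySem.Dict.size d : Int)))
        (PySem.Dict.empty : PySem.Dict String Int)
      = PySem.Dict.mk (pvPairsFrom 0 (PySem.Set.ofList vs)) := by
    have h0 := pvB_inv vs [] List.nodup_nil
    rw [PySem.Set.ofList_eq_foldl]
    exact h0
  -- A side: inserting the fresh distinct keys of dedup vs appends them in order
  have hnd : (PySem.List.dedup vs).Nodup := PySem.List.nodup_dedup vs
  have hA := PySem.Dict.items_foldl_insert_fresh
      (PySem.List.enumerate (PySem.List.dedup vs))
      (fun p => p.2) (fun p => p.1)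
      (PySem.Dict.empty : PySem.Dict String Int)
      (fun a _ => rfl)
      (by simp only [PySem.List.map_snd_enumerate]; exact hnd)
  simp only [hA, hB]
  simp [PySem.Dict.empty, pvPairsFrom_eq_enumerate, PySem.List.dedup_eq_ofList]
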